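-- pv_equiv track=rewrite | github.com/sykurtyppi/PIVOT_QUANT | scripts/train_rf.py | map_feature_groups
-- ===== SOURCE A (Python) =====
-- def map_feature_groups(feature_names, categorical_cols):
--     mapping = []
--     cat_sorted = sorted(categorical_cols, key=len, reverse=True)
--     for name in feature_names:
--         if name.startswith("num__"):
--             base = name[len("num__") :]
--         elif name.startswith("cat__"):
--             rest = name[len("cat__") :]
--             base = None
--             for col in cat_sorted:
--                 if rest == col or rest.startswith(f"{col}_"):
--                     base = col
--                     break
--             if base is None:
--                 base = rest
--         else:
--             base = name
--         mapping.append(base)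
--     return mapping
-- ===== SOURCE B (Python) =====
-- def map_feature_groups(feature_names, categorical_cols):
--     cat_set = set(categorical_cols)
--
--     def base_of(name):
--         if name.startswith("num__"):
--             return name[5:]
--         if name.startswith("cat__"):
--             rest = name[5:]
--             if rest in cat_set:
--                 return rest
--             for i in range(len(rest) - 1, -1, -1):
--                 if rest[i] == "_" and rest[:i] in cat_set:
--                     return rest[:i]
--             return rest
--         return name
--
--     return [base_of(name) for name in feature_names]
-- ===== Notes on version B (the rewrite author's own statement) =====
-- stated objective: alternative
-- what changed: Instead of sorting the columns by length and scanning the whole column list per cat__ feature, B builds a set of columns once and, per feature, enumerates the feature's own underscore-boundary prefixes longest-first, probing the set; the per-feature column scan disappears.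
import Mathlib
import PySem

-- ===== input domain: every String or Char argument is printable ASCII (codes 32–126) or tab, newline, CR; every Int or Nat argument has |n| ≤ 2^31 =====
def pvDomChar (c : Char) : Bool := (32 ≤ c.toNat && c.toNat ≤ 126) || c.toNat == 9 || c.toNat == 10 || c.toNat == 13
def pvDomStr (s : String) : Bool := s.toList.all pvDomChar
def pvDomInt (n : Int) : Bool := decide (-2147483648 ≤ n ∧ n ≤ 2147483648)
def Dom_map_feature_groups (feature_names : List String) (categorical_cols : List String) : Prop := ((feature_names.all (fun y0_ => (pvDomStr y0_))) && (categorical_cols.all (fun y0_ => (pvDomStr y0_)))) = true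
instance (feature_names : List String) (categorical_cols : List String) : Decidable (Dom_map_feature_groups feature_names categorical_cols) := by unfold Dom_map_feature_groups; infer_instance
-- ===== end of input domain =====

-- B replaces A's per-feature scan of the length-sorted column list by a one-time set of columns
-- probed at the feature's own underscore boundaries, longest prefix first (objective: alternative).

-- ===== PORT A =====
def map_feature_groups (feature_names : List String) (categorical_cols : List String) : List String :=
  let cat_sorted := PySem.List.sorted categorical_cols PySem.Str.len true
  feature_names.foldl (fun mapping name =>
    mapping ++
      [if PySem.Str.startswith name "num__" then PySem.Str.slice name (some 5) none
       else if PySem.Str.startswith name "cat__" then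
         let rest := PySem.Str.slice name (some 5) none
         match cat_sorted.find? (fun col => rest == col || PySem.Str.startswith rest (col ++ "_")) with
         | some col => col
         | none => rest
       else name]) []

-- ===== PORT B =====
-- the inner loop of Source B's base_of on the cat__ branch: descending i, first boundary prefix in the set
def altCatBase (rest : List Char) (catSet : PySem.Set (List Char)) : String :=
  if PySem.Set.contains catSet rest then String.ofList rest
  else
    match (PySem.List.pyRange ((rest.length : Int) - 1) (-1) (-1)).find?
        (fun i => (PySem.List.pyGet? rest i == some '_') && PySem.Set.contains catSet (rest.take i.toNat)) with
    | some i => String.ofList (rest.take i.toNat)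
    | none => String.ofList rest

def map_feature_groups_alt (feature_names : List String) (categorical_cols : List String) : List String :=
  let catSet := PySem.Set.ofList (categorical_cols.map String.toList)
  feature_names.map (fun name =>
    if PySem.Str.startswith name "num__" then PySem.Str.slice name (some 5) none
    else if PySem.Str.startswith name "cat__" then
      altCatBase (PySem.Str.slice name (some 5) none).toList catSet
    else name)

-- ===== PRECONDITION & SPEC =====
def Spec_map_feature_groups (feature_names : List String) (categorical_cols : List String) (out : List String) : Prop := out = map_feature_groups_alt feature_names categorical_cols
instance (feature_names : List String) (categorical_cols : List String) (out : List String) : Decidable (Spec_map_feature_groups feature_names categorical_cols out) := by unfold Spec_map_feature_groups; infer_instance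

-- ===== CLAIM (what is proved, stated in full; the proofs are below) =====
def Claim_equal_map_feature_groups : Prop := ∀ (feature_names : List String) (categorical_cols : List String), Dom_map_feature_groups feature_names categorical_cols → Spec_map_feature_groups feature_names categorical_cols (map_feature_groups feature_names categorical_cols)

-- ===== LEMMAS AND PROOFS =====

-- "col matches rest" in A's loop test, on char lists
def MatchM (rest col : List Char) : Prop := col = rest ∨ col ++ ['_'] <+: rest

theorem matchA_iff (rest col : String) :
    (rest == col || PySem.Str.startswith rest (col ++ "_")) = true ↔
      MatchM rest.toList col.toList := by
  have h1 : (col ++ "_").toList = col.toList ++ ['_'] := by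
    simp
  rw [Bool.or_eq_true, PySem.Str.startswith_eq, PySem.Chars.startswith_iff, h1, MatchM,
    beq_iff_eq]
  constructor
  · rintro (rfl | h)
    · exact Or.inl rfl
    · exact Or.inr h
  · rintro (h | h)
    · exact Or.inl (String.toList_inj.mp h).symm
    · exact Or.inr h

theorem MatchM.prefix {rest col : List Char} (h : MatchM rest col) : col <+: rest := by
  rcases h with rfl | h
  · exact List.prefix_refl _
  · exact ((col.prefix_append ['_']).trans h)

theorem MatchM.length_le {rest col : List Char} (h : MatchM rest col) :
    col.length ≤ rest.length := h.prefix.length_le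

theorem MatchM.take {rest col : List Char} (h : MatchM rest col) :
    col = rest.take col.length := by
  have := List.prefix_iff_eq_take.mp h.prefix
  simpa using this

theorem MatchM.underscore {rest col : List Char} (h : col ++ ['_'] <+: rest) :
    rest[col.length]? = some '_' := by
  obtain ⟨t, ht⟩ := h
  rw [← ht, List.append_assoc, List.singleton_append, List.getElem?_append_right le_rfl]
  simp

theorem MatchM.of_underscore {rest : List Char} {i : Nat} (hi : i < rest.length)
    (hc : rest[i]? = some '_') : MatchM rest (rest.take i) := by
  right
  refine ⟨rest.drop (i + 1), ?_⟩
  have : rest.drop i = '_' :: rest.drop (i + 1) := by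
    rw [List.drop_eq_getElem_cons hi]
    congr 1
    have := List.getElem?_eq_getElem hi
    rw [this] at hc
    exact Option.some.inj hc
  calc rest.take i ++ ['_'] ++ rest.drop (i + 1)
      = rest.take i ++ rest.drop i := by rw [List.append_assoc, List.singleton_append, this]
    _ = rest := List.take_append_drop i rest

-- a find? hit on a list sorted (weakly) descending by `key` is a matcher of maximal key
theorem find?_first_max {α : Type} {key : α → Int} {l : List α} {q : α → Bool} {x : α}
    (hp : l.Pairwise (fun a b => key b ≤ key a)) (h : l.find? q = some x) :
    q x = true ∧ x ∈ l ∧ ∀ y ∈ l, q y = true → key y ≤ key x := by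
  obtain ⟨hqx, as, bs, rfl, has⟩ := List.find?_eq_some_iff_append.mp h
  refine ⟨hqx, by simp, ?_⟩
  intro y hy hqy
  rw [List.pairwise_append] at hp
  obtain ⟨-, hcb, -⟩ := hp
  rcases List.mem_append.mp hy with hy | hy
  · exact absurd hqy (by simpa using has y hy)
  · rcases List.mem_cons.mp hy with rfl | hy
    · exact le_refl _
    · exact (List.pairwise_cons.mp hcb).1 y hy

theorem pyRange_desc (n : Nat) : PySem.List.pyRange ((n:Int) - 1) (-1) (-1)
    = List.map (fun k : Nat => ((n : Int) - 1 - (k : Int))) (List.range n) := by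
  unfold PySem.List.pyRange
  rcases Nat.eq_zero_or_pos n with h | h
  · subst h; norm_num
  · rw [if_neg (by omega : ¬ ((-1:Int) = 0))]
    simp only [if_neg (by omega : ¬ ((0:Int) < -1)),
        if_pos (by omega : (-1:Int) < (n:Int) - 1)]
    have hc : ((((n:Int) - 1) - (-1) + -(-1) - 1) / -(-1)) = (n:Int) := by norm_num
    rw [hc, Int.toNat_natCast]
    apply List.map_congr_left
    intro k hk
    omega

theorem mem_desc {n : Nat} {i : Int} :
    i ∈ List.map (fun k : Nat => ((n : Int) - 1 - (k : Int))) (List.range n) ↔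
      0 ≤ i ∧ i < n := by
  simp only [List.mem_map, List.mem_range]
  constructor
  · rintro ⟨k, hk, rfl⟩; omega
  · rintro ⟨h0, hn⟩
    exact ⟨n - 1 - i.toNat, by omega, by omega⟩

theorem pairwise_desc (n : Nat) :
    (List.map (fun k : Nat => ((n : Int) - 1 - (k : Int))) (List.range n)).Pairwise
      (fun a b => b ≤ a) := by
  rw [List.pairwise_map]
  exact (List.pairwise_lt_range (n := n)).imp (by intro a b h; omega)

theorem contains_iff (cats : List String) (l : List Char) :
    PySem.Set.contains (PySem.Set.ofList (cats.map String.toList)) l = true ↔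
      ∃ c ∈ cats, c.toList = l := by
  simp [PySem.Set.contains, PySem.Set.mem_ofList]

-- unfolding lemmas for altCatBase, one per outcome of Source B's base_of on the cat__ branch
theorem altB_pos (rest : List Char) (S : PySem.Set (List Char))
    (h : PySem.Set.contains S rest = true) :
    altCatBase rest S = String.ofList rest := by
  have h' : rest ∈ S := by simpa [PySem.Set.contains] using h
  simp [altCatBase, h']

theorem altB_hit (rest : List Char) (S : PySem.Set (List Char)) (i : Int)
    (h : PySem.Set.contains S rest = false)
    (hf : (PySem.List.pyRange ((rest.length : Int) - 1) (-1) (-1)).find?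
        (fun i => (PySem.List.pyGet? rest i == some '_') && PySem.Set.contains S (rest.take i.toNat)) = some i) :
    altCatBase rest S = String.ofList (rest.take i.toNat) := by
  have h' : rest ∉ S := by simpa [PySem.Set.contains] using h
  simp only [PySem.Set.contains, List.contains_eq_mem] at hf
  simp [altCatBase, h', hf]

theorem altB_miss (rest : List Char) (S : PySem.Set (List Char))
    (h : PySem.Set.contains S rest = false)
    (hf : (PySem.List.pyRange ((rest.length : Int) - 1) (-1) (-1)).find?
        (fun i => (PySem.List.pyGet? rest i == some '_') && PySem.Set.contains S (rest.take i.toNat)) = none) :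
    altCatBase rest S = String.ofList rest := by
  have h' : rest ∉ S := by simpa [PySem.Set.contains] using h
  simp only [PySem.Set.contains, List.contains_eq_mem] at hf
  simp [altCatBase, h', hf]

-- the heart: per feature, A's scan of the length-sorted columns = B's longest-first boundary probe
theorem base_eq (cats : List String) (rest : String) :
    (match (PySem.List.sorted cats PySem.Str.len true).find?
        (fun col => rest == col || PySem.Str.startswith rest (col ++ "_")) with
     | some col => col
     | none => rest)
    = altCatBase rest.toList (PySem.Set.ofList (cats.map String.toList)) := by
  have hqiff : ∀ i : Int,
      ((PySem.List.pyGet? rest.toList i == some '_') && PySem.Set.contains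
        (PySem.Set.ofList (cats.map String.toList)) (rest.toList.take i.toNat)) = true ↔
      (PySem.List.pyGet? rest.toList i = some '_' ∧
        ∃ c ∈ cats, c.toList = rest.toList.take i.toNat) := by
    intro i
    simp only [Bool.and_eq_true, beq_iff_eq]
    rw [contains_iff]
  have hpairA := PySem.List.sorted_pairwise_rev cats PySem.Str.len
  cases hfind : (PySem.List.sorted cats PySem.Str.len true).find?
      (fun col => rest == col || PySem.Str.startswith rest (col ++ "_")) with
  | none =>
    -- no column matches at all: both sides fall back to rest
    rw [List.find?_eq_none] at hfind
    have hnom : ∀ c ∈ cats, ¬ MatchM rest.toList c.toList := by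
      intro c hc hm
      exact hfind c ((PySem.List.mem_sorted cats PySem.Str.len true c).mpr hc)
        ((matchA_iff rest c).mpr hm)
    have hcon : PySem.Set.contains (PySem.Set.ofList (cats.map String.toList)) rest.toList = false := by
      rcases Bool.eq_false_or_eq_true (PySem.Set.contains
          (PySem.Set.ofList (cats.map String.toList)) rest.toList) with h | h
      · obtain ⟨c, hc, hcl⟩ := (contains_iff cats rest.toList).mp h
        exact absurd (Or.inl hcl) (hnom c hc)
      · exact h
    have hfB : (PySem.List.pyRange ((rest.toList.length : Int) - 1) (-1) (-1)).find?
        (fun i => (PySem.List.pyGet? rest.toList i == some '_') && PySem.Set.contains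
          (PySem.Set.ofList (cats.map String.toList)) (rest.toList.take i.toNat)) = none := by
      rw [List.find?_eq_none]
      intro i hi hqi
      rw [pyRange_desc, mem_desc] at hi
      obtain ⟨hg, c, hc, hcl⟩ := (hqiff i).mp hqi
      have hgl : rest.toList[i.toNat]? = some '_' := by
        rw [← PySem.List.pyGet?_natCast rest.toList i.toNat, Int.toNat_of_nonneg hi.1]; exact hg
      have hlt : i.toNat < rest.toList.length := (List.getElem?_eq_some_iff.mp hgl).1
      exact absurd (hcl ▸ MatchM.of_underscore hlt hgl) (hnom c hc)
    rw [altB_miss _ _ hcon hfB]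
    simp
  | some col =>
    obtain ⟨hqcol, hmemS, hmax⟩ := find?_first_max hpairA hfind
    have hmcol : MatchM rest.toList col.toList := (matchA_iff rest col).mp hqcol
    have hcolcats : col ∈ cats := (PySem.List.mem_sorted cats PySem.Str.len true col).mp hmemS
    have hmaxM : ∀ c ∈ cats, MatchM rest.toList c.toList → c.toList.length ≤ col.toList.length := by
      intro c hc hm
      have := hmax c ((PySem.List.mem_sorted cats PySem.Str.len true c).mpr hc)
        ((matchA_iff rest c).mpr hm)
      rw [PySem.Str.len_eq, PySem.Str.len_eq] at this
      exact_mod_cast this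
    rcases Bool.eq_false_or_eq_true (PySem.Set.contains
        (PySem.Set.ofList (cats.map String.toList)) rest.toList) with hcon | hcon
    · -- rest itself is a column: the longest matcher is rest, so A found exactly rest
      obtain ⟨c, hc, hcl⟩ := (contains_iff cats rest.toList).mp hcon
      have hrle : rest.toList.length ≤ col.toList.length := by
        have := hmaxM c hc (Or.inl hcl)
        rw [hcl] at this
        exact this
      have hcoleq : col.toList = rest.toList :=
        hmcol.prefix.eq_of_length (le_antisymm hmcol.length_le hrle)
      rw [altB_pos _ _ hcon]
      exact String.toList_inj.mp (by simp [hcoleq])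
    · -- rest itself is not a column: the match strips at an underscore boundary
      have hne : col.toList ≠ rest.toList := by
        intro h
        have ht := (contains_iff cats rest.toList).mpr ⟨col, hcolcats, h⟩
        rw [hcon] at ht
        exact Bool.false_ne_true ht
      have hpre : col.toList ++ ['_'] <+: rest.toList := by
        rcases hmcol with h | h
        · exact absurd h hne
        · exact h
      have hmlt : col.toList.length < rest.toList.length := by
        have := hpre.length_le
        rw [List.length_append, List.length_singleton] at this
        omega
      have hund : rest.toList[col.toList.length]? = some '_' := MatchM.underscore hpre
      have hqm : ((PySem.List.pyGet? rest.toList (col.toList.length : Int) == some '_') &&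
          PySem.Set.contains (PySem.Set.ofList (cats.map String.toList))
            (rest.toList.take (col.toList.length : Int).toNat)) = true := by
        rw [hqiff]
        refine ⟨?_, col, hcolcats, ?_⟩
        · rw [PySem.List.pyGet?_natCast]
          exact hund
        · rw [Int.toNat_natCast]
          exact hmcol.take
      have hmemm : ((col.toList.length : Int)) ∈
          PySem.List.pyRange ((rest.toList.length : Int) - 1) (-1) (-1) := by
        rw [pyRange_desc, mem_desc]; omega
      cases hfB : (PySem.List.pyRange ((rest.toList.length : Int) - 1) (-1) (-1)).find?
          (fun i => (PySem.List.pyGet? rest.toList i == some '_') && PySem.Set.contains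
            (PySem.Set.ofList (cats.map String.toList)) (rest.toList.take i.toNat)) with
      | none =>
        rw [List.find?_eq_none] at hfB
        exact absurd hqm (hfB _ hmemm)
      | some i =>
        have hpairB : (PySem.List.pyRange ((rest.toList.length : Int) - 1) (-1) (-1)).Pairwise
            (fun a b : Int => b ≤ a) := by
          rw [pyRange_desc]; exact pairwise_desc rest.toList.length
        obtain ⟨hqi, hiS, himax⟩ := find?_first_max (key := fun i : Int => i) hpairB hfB
        rw [pyRange_desc, mem_desc] at hiS
        have hmle : ((col.toList.length : Int)) ≤ i := himax _ hmemm hqm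
        obtain ⟨hg, c, hc, hcl⟩ := (hqiff i).mp hqi
        have hgl : rest.toList[i.toNat]? = some '_' := by
          rw [← PySem.List.pyGet?_natCast rest.toList i.toNat, Int.toNat_of_nonneg hiS.1]; exact hg
        have hlt : i.toNat < rest.toList.length := (List.getElem?_eq_some_iff.mp hgl).1
        have hMi : MatchM rest.toList (rest.toList.take i.toNat) :=
          MatchM.of_underscore hlt hgl
        have hile : i.toNat ≤ col.toList.length := by
          have := hmaxM c hc (hcl ▸ hMi)
          rw [hcl, List.length_take] at this
          omega
        have hieq : i.toNat = col.toList.length := by omega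
        rw [altB_hit _ _ i hcon hfB, hieq, ← hmcol.take]
        exact String.toList_inj.mp (by simp)

-- ===== VERDICT (by name: the statement is the Claim_ definition above) =====
theorem map_feature_groups_spec : Claim_equal_map_feature_groups := by
  intro feature_names categorical_cols _
  unfold Spec_map_feature_groups map_feature_groups map_feature_groups_alt
  rw [PySem.List.foldl_append_singleton_eq_map, List.nil_append]
  apply List.map_congr_left
  intro name _
  by_cases h1 : PySem.Str.startswith name "num__" = true
  · rw [if_pos h1, if_pos h1]
  · rw [if_neg h1, if_neg h1]
    by_cases h2 : PySem.Str.startswith name "cat__" = true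
    · rw [if_pos h2, if_pos h2]
      exact base_eq categorical_cols (PySem.Str.slice name (some 5) none)
    · rw [if_neg h2, if_neg h2]
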